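-- pv_equiv track=rewrite | github.com/Owen-Huggins/CS-Projects | CS 1301/HW03.py | tennisMatch
-- ===== SOURCE A (Python) =====
-- def tennisMatch(player_1, player_2, match_record):
--     pass
--     p1 = 0
--     p2 = 0
--     p1_score = 0
--     p2_score = 0
--
--     for num in match_record:
--
--         if num == "1":
--             p1 +=1
--
--         if num == "2":
--             p2 +=1
--
--         if num == "-":
--             if p2 < p1:
--                 p1_score += 1
--                 p1 = 0
--                 p2 = 0
--
--             elif p1 < p2:
--                 p2_score += 1
--                 p1 = 0
--                 p2 = 0
--
--
--             elif p1 == p2: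
--                 p1 = 0
--                 p2 = 0
--
--
--     if p1_score > p2_score:
--         return("{} won! The score was {}-{}.".format(player_1, p1_score, p2_score))
--     elif p2_score > p1_score:
--         return("{} won! The score was {}-{}.".format(player_2, p2_score, p1_score))
--     elif p1_score == p2_score:
--         return("It's a tie!")
-- ===== SOURCE B (Python) =====
-- def tennisMatch(player_1, player_2, match_record):
--     p1_score = 0
--     p2_score = 0
--     for seg in match_record.split("-")[:-1]:
--         c1 = seg.count("1")
--         c2 = seg.count("2")
--         if c1 > c2:
--             p1_score += 1
--         elif c2 > c1:
--             p2_score += 1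
--     if p1_score > p2_score:
--         return "{} won! The score was {}-{}.".format(player_1, p1_score, p2_score)
--     elif p2_score > p1_score:
--         return "{} won! The score was {}-{}.".format(player_2, p2_score, p1_score)
--     else:
--         return "It's a tie!"
-- ===== Notes on version B (the rewrite author's own statement) =====
-- stated objective: faster
-- what changed: B replaces A's per-character loop with four reset counters by splitting the record on '-' and counting '1'/'2' per completed segment via str.split/str.count (C-level scans), never scoring the last segment just like A.
import Mathlib
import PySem

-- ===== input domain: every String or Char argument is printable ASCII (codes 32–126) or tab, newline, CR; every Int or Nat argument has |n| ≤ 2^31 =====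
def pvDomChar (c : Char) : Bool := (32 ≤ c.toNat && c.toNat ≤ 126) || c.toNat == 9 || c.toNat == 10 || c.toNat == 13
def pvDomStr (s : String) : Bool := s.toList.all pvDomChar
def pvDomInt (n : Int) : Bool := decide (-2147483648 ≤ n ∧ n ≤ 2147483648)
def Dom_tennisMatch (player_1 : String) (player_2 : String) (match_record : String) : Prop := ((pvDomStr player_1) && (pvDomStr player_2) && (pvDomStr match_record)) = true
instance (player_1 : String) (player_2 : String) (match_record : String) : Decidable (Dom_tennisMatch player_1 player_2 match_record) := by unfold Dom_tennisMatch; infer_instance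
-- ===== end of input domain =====

-- B splits the record on '-' and counts '1'/'2' per completed segment instead of A's
-- character loop with reset counters; same return value everywhere (measured faster in Python).

-- ===== PORT A =====
def tennisMatch (player_1 : String) (player_2 : String) (match_record : String) : String :=
  let final := match_record.toList.foldl
    (fun (st : Int × Int × Int × Int) num =>
      let p1 := if num = '1' then st.1 + 1 else st.1
      let p2 := if num = '2' then st.2.1 + 1 else st.2.1
      if num = '-' then
        if p2 < p1 then (0, 0, st.2.2.1 + 1, st.2.2.2)
        else if p1 < p2 then (0, 0, st.2.2.1, st.2.2.2 + 1)
        else (0, 0, st.2.2.1, st.2.2.2)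
      else (p1, p2, st.2.2.1, st.2.2.2))
    (0, 0, 0, 0)
  if final.2.2.1 > final.2.2.2 then
    player_1 ++ " won! The score was " ++ PySem.Int.toStr final.2.2.1 ++ "-" ++ PySem.Int.toStr final.2.2.2 ++ "."
  else if final.2.2.2 > final.2.2.1 then
    player_2 ++ " won! The score was " ++ PySem.Int.toStr final.2.2.2 ++ "-" ++ PySem.Int.toStr final.2.2.1 ++ "."
  else "It's a tie!"

-- ===== PORT B =====
def tennisMatch_alt (player_1 : String) (player_2 : String) (match_record : String) : String :=
  let segs := PySem.Chars.splitOn match_record.toList ['-']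
  let scores := (PySem.List.slice segs none (some (-1))).foldl
    (fun (st : Int × Int) seg =>
      let c1 : Int := PySem.Chars.count seg ['1']
      let c2 : Int := PySem.Chars.count seg ['2']
      if c1 > c2 then (st.1 + 1, st.2)
      else if c2 > c1 then (st.1, st.2 + 1)
      else st)
    (0, 0)
  if scores.1 > scores.2 then
    player_1 ++ " won! The score was " ++ PySem.Int.toStr scores.1 ++ "-" ++ PySem.Int.toStr scores.2 ++ "."
  else if scores.2 > scores.1 then
    player_2 ++ " won! The score was " ++ PySem.Int.toStr scores.2 ++ "-" ++ PySem.Int.toStr scores.1 ++ "."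
  else "It's a tie!"

-- ===== PRECONDITION & SPEC =====
def Spec_tennisMatch (player_1 : String) (player_2 : String) (match_record : String) (out : String) : Prop := out = tennisMatch_alt player_1 player_2 match_record
instance (player_1 : String) (player_2 : String) (match_record : String) (out : String) : Decidable (Spec_tennisMatch player_1 player_2 match_record out) := by unfold Spec_tennisMatch; infer_instance

-- ===== CLAIM (what is proved, stated in full; the proofs are below) =====
def Claim_equal_tennisMatch : Prop := ∀ (player_1 : String) (player_2 : String) (match_record : String), Dom_tennisMatch player_1 player_2 match_record → Spec_tennisMatch player_1 player_2 match_record (tennisMatch player_1 player_2 match_record)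

-- ===== LEMMAS AND PROOFS =====

-- structural characterization of splitting on '-'
def splitOnDash : List Char → List (List Char)
  | [] => [[]]
  | c :: cs => if c = '-' then [] :: splitOnDash cs else (splitOnDash cs).modifyHead (c :: ·)

theorem splitOnDash_ne_nil (cs : List Char) : splitOnDash cs ≠ [] := by
  induction cs with
  | nil => simp [splitOnDash]
  | cons c cs ih =>
    simp only [splitOnDash]
    split
    · simp
    · cases h : splitOnDash cs with
      | nil => exact absurd h ih
      | cons a t => simp [List.modifyHead]

theorem splitOn_go_eq (fuel : Nat) (cs cur : List Char) (acc : List (List Char))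
    (h : cs.length ≤ fuel) :
    PySem.Chars.splitOn.go ['-'] fuel cs cur acc
      = acc.reverse ++ (splitOnDash cs).modifyHead (cur.reverse ++ ·) := by
  induction fuel generalizing cs cur acc with
  | zero =>
    cases cs with
    | nil => simp [PySem.Chars.splitOn.go, splitOnDash]
    | cons c t => simp at h
  | succ fuel ih =>
    cases cs with
    | nil => simp [PySem.Chars.splitOn.go, splitOnDash]
    | cons c t =>
      rw [PySem.Chars.splitOn.go]
      by_cases hc : c = '-'
      · subst hc
        simp only [List.isPrefixOf, BEq.rfl, Bool.true_and, if_pos,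
          List.length_singleton, List.drop_succ_cons, List.drop_zero]
        rw [ih t [] (cur.reverse :: acc) (by simpa using h)]
        simp only [splitOnDash, reduceIte]
        obtain ⟨a, rest, hs⟩ := List.exists_cons_of_ne_nil (splitOnDash_ne_nil t)
        simp [hs, List.modifyHead]
      · have hpre : (['-'].isPrefixOf (c :: t)) = false := by
          simp [List.isPrefixOf]
          exact fun hh => absurd hh.symm hc
        rw [hpre]
        simp only [Bool.false_eq_true, if_false]
        rw [ih t (c :: cur) acc (by simpa using Nat.le_of_succ_le_succ h)]
        simp only [splitOnDash, if_neg hc]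
        obtain ⟨a, rest, hs⟩ := List.exists_cons_of_ne_nil (splitOnDash_ne_nil t)
        simp [hs, List.modifyHead]
theorem splitOn_eq (cs : List Char) :
    PySem.Chars.splitOn cs ['-'] = splitOnDash cs := by
  rw [PySem.Chars.splitOn, splitOn_go_eq (cs.length + 1) cs [] [] (by omega)]
  obtain ⟨a, rest, hs⟩ := List.exists_cons_of_ne_nil (splitOnDash_ne_nil cs)
  simp [hs, List.modifyHead]

theorem count_go_eq (c : Char) (fuel : Nat) (l : List Char) (acc : Nat)
    (h : l.length ≤ fuel) :
    PySem.Chars.count.go [c] fuel l acc = acc + l.count c := by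
  induction fuel generalizing l acc with
  | zero =>
    cases l with
    | nil => simp [PySem.Chars.count.go]
    | cons d t => simp at h
  | succ fuel ih =>
    cases l with
    | nil => simp [PySem.Chars.count.go]
    | cons d t =>
      rw [PySem.Chars.count.go]
      by_cases hd : d = c
      · subst hd
        simp only [List.isPrefixOf, BEq.rfl, Bool.true_and, if_pos,
          List.length_singleton, List.drop_succ_cons, List.drop_zero]
        rw [ih t (acc + 1) (by simpa using h), List.count_cons_self]
        omega
      · have hpre : ([c].isPrefixOf (d :: t)) = false := by
          simp [List.isPrefixOf]
          exact fun hh => absurd hh.symm hd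
        rw [hpre]
        simp only [Bool.false_eq_true, if_false]
        rw [ih t acc (by simpa using Nat.le_of_succ_le_succ h)]
        simp [hd]

theorem count_eq_listCount (cs : List Char) (c : Char) :
    PySem.Chars.count cs [c] = cs.count c := by
  rw [PySem.Chars.count]
  simp only [List.isEmpty_cons, Bool.false_eq_true, if_false]
  simpa using count_go_eq c cs.length cs 0 (le_refl _)

-- the set-judging step both programs perform
def judge (p1 p2 : Int) (st : Int × Int) : Int × Int :=
  if p2 < p1 then (st.1 + 1, st.2) else if p1 < p2 then (st.1, st.2 + 1) else st

-- run the completed segments; (p1, p2) are counts carried into the first segment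
def runSegs : List (List Char) → Int → Int → Int × Int → Int × Int
  | [], _, _, st => st
  | seg :: rest, p1, p2, st =>
      runSegs rest 0 0 (judge (p1 + (seg.count '1' : Int)) (p2 + (seg.count '2' : Int)) st)

theorem scores_eq (cs : List Char) (p1 p2 s1 s2 : Int) :
    (cs.foldl
      (fun (st : Int × Int × Int × Int) num =>
        let q1 := if num = '1' then st.1 + 1 else st.1
        let q2 := if num = '2' then st.2.1 + 1 else st.2.1
        if num = '-' then
          if q2 < q1 then (0, 0, st.2.2.1 + 1, st.2.2.2)
          else if q1 < q2 then (0, 0, st.2.2.1, st.2.2.2 + 1)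
          else (0, 0, st.2.2.1, st.2.2.2)
        else (q1, q2, st.2.2.1, st.2.2.2))
      (p1, p2, s1, s2)).2.2
      = runSegs (splitOnDash cs).dropLast p1 p2 (s1, s2) := by
  induction cs generalizing p1 p2 s1 s2 with
  | nil => simp [splitOnDash, runSegs]
  | cons c cs ih =>
    by_cases hc : c = '-'
    · subst hc
      rw [List.foldl_cons]
      simp only [Char.reduceEq, reduceIte]
      simp only [splitOnDash, reduceIte]
      obtain ⟨a, rest, hs⟩ := List.exists_cons_of_ne_nil (splitOnDash_ne_nil cs)
      rw [hs, List.dropLast_cons₂, runSegs]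
      simp only [List.count_nil, Int.natCast_zero, add_zero]
      split_ifs with h1 h2
      · rw [ih]; simp [judge, h1, hs]
      · rw [ih]; simp [judge, h1, h2, hs]
      · rw [ih]; simp [judge, h1, h2, hs]
    · simp only [List.foldl_cons, if_neg hc]
      rw [ih]
      simp only [splitOnDash, if_neg hc]
      obtain ⟨a, rest, hs⟩ := List.exists_cons_of_ne_nil (splitOnDash_ne_nil cs)
      rw [hs, List.modifyHead]
      cases rest with
      | nil => rfl
      | cons b t =>
        rw [List.dropLast_cons₂, List.dropLast_cons₂, runSegs, runSegs]
        have h1 : ((c :: a).count '1' : Int) = (if c = '1' then (1 : Int) else 0) + (a.count '1' : Int) := by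
          by_cases hc1 : c = '1' <;> simp [hc1] <;> try omega
        have h2 : ((c :: a).count '2' : Int) = (if c = '2' then (1 : Int) else 0) + (a.count '2' : Int) := by
          by_cases hc2 : c = '2' <;> simp [hc2] <;> try omega
        rw [h1, h2]
        congr 1
        congr 1 <;> split_ifs <;> ring

theorem foldB_eq_runSegs (segs : List (List Char)) (st : Int × Int) :
    segs.foldl
      (fun (st : Int × Int) seg =>
        let c1 : Int := PySem.Chars.count seg ['1']
        let c2 : Int := PySem.Chars.count seg ['2']
        if c1 > c2 then (st.1 + 1, st.2)
        else if c2 > c1 then (st.1, st.2 + 1)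
        else st)
      st
      = runSegs segs 0 0 st := by
  induction segs generalizing st with
  | nil => simp [runSegs]
  | cons seg rest ih =>
    rw [List.foldl_cons, ih, runSegs]
    simp only [count_eq_listCount, zero_add]
    rfl

-- ===== VERDICT (by name: the statement is the Claim_ definition above) =====
theorem tennisMatch_spec : Claim_equal_tennisMatch := by
  intro player_1 player_2 match_record _
  show tennisMatch player_1 player_2 match_record = tennisMatch_alt player_1 player_2 match_record
  simp only [tennisMatch, tennisMatch_alt]
  rw [PySem.List.slice_to_neg_one, splitOn_eq, foldB_eq_runSegs, ← scores_eq]
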